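-- pv_equiv track=rewrite | github.com/WaTerminator/ABLkit | abducer/kb.py | valid_formula
-- ===== SOURCE A (Python) =====
-- def valid_formula(formula):
--     if(len(formula) % 2 == 0):
--         return False
--     for i in range(len(formula)):
--         if(i % 2 == 0 and formula[i] not in ['0', '1', '2', '3', '4', '5', '6', '7', '8', '9']):
--             return False
--         if(i % 2 != 0 and formula[i] not in ['+', '-', '*', '/']):
--             return False
--     return True
-- ===== SOURCE B (Python) =====
-- _DIGITS = set('0123456789')
-- _OPS = set('+-*/')
--
--
-- def valid_formula(formula):
--     # staged: odd length, even-position slice all digits, odd-position slice all operators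
--     return (len(formula) % 2 == 1
--             and set(formula[0::2]) <= _DIGITS
--             and set(formula[1::2]) <= _OPS)
-- ===== Notes on version B (the rewrite author's own statement) =====
-- stated objective: simpler
-- what changed: Replaces the indexed loop with early returns and parity tests by a single three-conjunct expression: odd length, the even-position slice formula[0::2] is a subset of the digit set, and the odd-position slice formula[1::2] is a subset of the operator set; no index or loop remains.
import Mathlib
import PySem

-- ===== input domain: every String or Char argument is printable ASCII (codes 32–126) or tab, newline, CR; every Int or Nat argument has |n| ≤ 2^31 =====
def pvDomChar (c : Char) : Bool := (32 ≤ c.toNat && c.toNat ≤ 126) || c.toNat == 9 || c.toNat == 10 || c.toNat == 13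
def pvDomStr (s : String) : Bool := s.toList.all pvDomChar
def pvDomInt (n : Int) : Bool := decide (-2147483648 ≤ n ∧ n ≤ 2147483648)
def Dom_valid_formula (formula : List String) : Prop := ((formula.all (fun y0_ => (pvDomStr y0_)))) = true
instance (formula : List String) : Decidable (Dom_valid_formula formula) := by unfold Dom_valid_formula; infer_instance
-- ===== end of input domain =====

-- B replaces A's indexed loop with a three-conjunct staged check: odd length, the
-- even-position slice is a subset of the digit set, the odd-position slice a subset
-- of the operator set; same cost, simpler.


-- ===== PORT A =====
def pvDigitsA : List String := ["0", "1", "2", "3", "4", "5", "6", "7", "8", "9"]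
def pvOpsA : List String := ["+", "-", "*", "/"]

-- the for-loop over range(len(formula)), element x at index i
def pvLoopA : List String → Nat → Bool
  | [], _ => true
  | x :: rest, i =>
    if i % 2 == 0 && !(pvDigitsA.contains x) then false
    else if i % 2 != 0 && !(pvOpsA.contains x) then false
    else pvLoopA rest (i + 1)

def valid_formula (formula : List String) : Bool :=
  if formula.length % 2 == 0 then false
  else pvLoopA formula 0

-- ===== PORT B =====
def pvDigitsB : PySem.Set String := PySem.Set.ofList ["0", "1", "2", "3", "4", "5", "6", "7", "8", "9"]
def pvOpsB : PySem.Set String := PySem.Set.ofList ["+", "-", "*", "/"]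

-- formula[0::2] / formula[1::2]; step 2 ≠ 0, so slice? always returns some (getD [] is unreachable)
def valid_formula_alt (formula : List String) : Bool :=
  (formula.length % 2 == 1)
  && PySem.Set.issubset (PySem.Set.ofList ((PySem.List.slice? formula (some 0) none 2).getD [])) pvDigitsB
  && PySem.Set.issubset (PySem.Set.ofList ((PySem.List.slice? formula (some 1) none 2).getD [])) pvOpsB

-- ===== PRECONDITION & SPEC =====
def Spec_valid_formula (formula : List String) (out : Bool) : Prop := out = valid_formula_alt formula
instance (formula : List String) (out : Bool) : Decidable (Spec_valid_formula formula out) := by unfold Spec_valid_formula; infer_instance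

-- ===== CLAIM (what is proved, stated in full; the proofs are below) =====
def Claim_equal_valid_formula : Prop := ∀ (formula : List String), Dom_valid_formula formula → Spec_valid_formula formula (valid_formula formula)

-- ===== LEMMAS AND PROOFS =====

-- elements at even positions
def pvEvery2 {α : Type} : List α → List α
  | [] => []
  | [x] => [x]
  | x :: _ :: r => x :: pvEvery2 r

theorem pvEvery2_cons {α : Type} (y : α) (r : List α) :
    pvEvery2 (y :: r) = y :: pvEvery2 r.tail := by
  cases r <;> rfl

theorem pvFilterMap_every2 {α : Type} (xs : List α) :
    List.filterMap (fun k : Nat => xs[2 * k]?) (List.range ((xs.length + 1) / 2)) = pvEvery2 xs := by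
  induction xs using pvEvery2.induct with
  | case1 => simp [pvEvery2]
  | case2 x => simp [pvEvery2, List.range_succ]
  | case3 x y r ih =>
    have hlen : ((x :: y :: r).length + 1) / 2 = (r.length + 1) / 2 + 1 := by
      simp only [List.length_cons]; omega
    rw [hlen, List.range_succ_eq_map, List.filterMap_cons, List.filterMap_map]
    have h0 : (x :: y :: r)[2 * 0]? = some x := rfl
    rw [h0]
    have hsucc : (fun k : Nat => (x :: y :: r)[2 * k]?) ∘ Nat.succ = fun k : Nat => r[2 * k]? := by
      funext k
      have : 2 * Nat.succ k = (2 * k) + 1 + 1 := by omega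
      simp [this]
    rw [hsucc, ih]
    simp [pvEvery2]

theorem pvSlice0 {α : Type} (xs : List α) :
    (PySem.List.slice? xs (some 0) none 2).getD [] = pvEvery2 xs := by
  have hcount : (if 0 < xs.length then (((xs.length:Int) + 2 - 1) / 2).toNat else 0)
      = (xs.length + 1) / 2 := by
    split_ifs with h <;> omega
  simp only [PySem.List.slice?, PySem.List.sliceIndices]
  norm_num
  rw [hcount]
  have harg : (fun k : Nat => xs[(2 * (k:Int)).toNat]?) = fun k : Nat => xs[2 * k]? := by
    funext k
    congr 1
  rw [harg, pvFilterMap_every2]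

theorem pvSlice1 {α : Type} (xs : List α) :
    (PySem.List.slice? xs (some 1) none 2).getD [] = pvEvery2 xs.tail := by
  cases xs with
  | nil => rfl
  | cons x t =>
    have hcount : (if 0 < t.length then (((t.length:Int) + 2 - 1) / 2).toNat else 0)
        = (t.length + 1) / 2 := by
      split_ifs with h <;> omega
    simp only [PySem.List.slice?, PySem.List.sliceIndices]
    norm_num
    rw [hcount]
    have harg : (fun k : Nat => (x :: t)[(1 + 2 * (k:Int)).toNat]?) = fun k : Nat => t[2 * k]? := by
      funext k
      have h1 : ((1:Int) + 2 * (k:Int)).toNat = 2 * k + 1 := by omega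
      rw [h1]
      simp
    rw [harg, pvFilterMap_every2]

theorem pvSubset_all (l : List String) (s : PySem.Set String) :
    PySem.Set.issubset (PySem.Set.ofList l) s = l.all s.contains := by
  simp only [PySem.Set.issubset]
  rcases h : l.all s.contains with _ | _
  · simp only [List.all_eq_false] at h ⊢
    obtain ⟨x, hx, hxc⟩ := h
    exact ⟨x, (PySem.Set.mem_ofList l x).mpr hx, hxc⟩
  · simp only [List.all_eq_true] at h ⊢
    intro x hx
    exact h x ((PySem.Set.mem_ofList l x).mp hx)

theorem pvSetDigits : pvDigitsB = pvDigitsA := by decide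
theorem pvSetOps : pvOpsB = pvOpsA := by decide

theorem pvLoopA_mod (l : List String) : ∀ i, pvLoopA l i = pvLoopA l (i % 2) := by
  induction l with
  | nil => intro i; rfl
  | cons x rest ih =>
    intro i
    simp only [pvLoopA]
    have h2 : i % 2 % 2 = i % 2 := by omega
    rw [h2]
    have hrec : pvLoopA rest (i + 1) = pvLoopA rest (i % 2 + 1) := by
      rw [ih (i + 1), ih (i % 2 + 1)]
      congr 1
      omega
    rw [hrec]

-- A's loop from index 0 is the staged even/odd-position check
theorem pvLoopA_split (l : List String) :
    pvLoopA l 0 = ((pvEvery2 l).all pvDigitsB.contains && (pvEvery2 l.tail).all pvOpsB.contains) := by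
  induction l using pvEvery2.induct with
  | case1 => rfl
  | case2 x =>
    by_cases hx : x ∈ pvDigitsA <;>
      simp [pvLoopA, pvEvery2, pvSetDigits, PySem.Set.contains, hx]
  | case3 x y r ih =>
    have h2 : pvLoopA r (1 + 1) = pvLoopA r 0 := pvLoopA_mod r 2
    simp only [pvEvery2, List.tail_cons, pvEvery2_cons, pvSetDigits, pvSetOps] at ih ⊢
    by_cases hx : x ∈ pvDigitsA <;> by_cases hy : y ∈ pvOpsA <;>
      simp [pvLoopA, h2, ih, hx, hy]

-- ===== VERDICT (by name: the statement is the Claim_ definition above) =====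
theorem valid_formula_spec : Claim_equal_valid_formula := by
  intro formula _
  unfold Spec_valid_formula valid_formula valid_formula_alt
  rw [pvSlice0, pvSlice1, pvSubset_all, pvSubset_all]
  by_cases hev : formula.length % 2 = 0
  · have h1 : (formula.length % 2 == 0) = true := by simp [hev]
    have h2 : (formula.length % 2 == 1) = false := by simp [hev]
    rw [h1, h2]
    simp
  · have h1 : (formula.length % 2 == 0) = false := by simp [hev]
    have h2 : (formula.length % 2 == 1) = true := by simp only [beq_iff_eq]; omega
    rw [h1, h2]
    simp [pvLoopA_split]
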